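-- pv_equiv track=rewrite | github.com/TahuatauTempeh/Randoms | Tugas/Semester 1/Praktikum DasPro/Pertemuan 11 Responsi : Azka Aqylla Maulana_24060124140195_A2/siswa terpilih.py | nilai
-- ===== SOURCE A (Python) =====
-- def FirstList(s):
--     return s[0]
--
-- def TailList(s):
--     return s[1:]
--
-- def LastList(s):
--     return s[-1]
--
-- def IsEmpty(s):
--     return s == []
--
-- def nilai(siswa, LoL):
--     if IsEmpty(LoL):
--         return "Siswa itu tidak ada di kelas ini"
--     else:
--         if FirstList(FirstList(LoL)) == siswa:
--             return LastList(FirstList(LoL))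
--         else:
--             return nilai(siswa, TailList(LoL))
-- ===== SOURCE B (Python) =====
-- def nilai(siswa, LoL):
--     # Build a grade index back-to-front so that the FIRST matching record wins,
--     # then answer with a single dictionary lookup.
--     grades = {}
--     for student in reversed(LoL):
--         grades[student[0]] = student[-1]
--     return grades.get(siswa, "Siswa itu tidak ada di kelas ini")
-- ===== Notes on version B (the rewrite author's own statement) =====
-- stated objective: alternative
-- what changed: Replaces the tail-slicing recursion with a single reversed pass that builds a dict (later writes overwrite, so the first matching record wins) followed by one lookup; it trades the early exit of a search for an index built over the whole list, so it is not faster when the match comes early.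
-- outside the precondition, e.g. on nilai('a', [['a', '9'], []]): A returns '9', B raises IndexError
import Mathlib
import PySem

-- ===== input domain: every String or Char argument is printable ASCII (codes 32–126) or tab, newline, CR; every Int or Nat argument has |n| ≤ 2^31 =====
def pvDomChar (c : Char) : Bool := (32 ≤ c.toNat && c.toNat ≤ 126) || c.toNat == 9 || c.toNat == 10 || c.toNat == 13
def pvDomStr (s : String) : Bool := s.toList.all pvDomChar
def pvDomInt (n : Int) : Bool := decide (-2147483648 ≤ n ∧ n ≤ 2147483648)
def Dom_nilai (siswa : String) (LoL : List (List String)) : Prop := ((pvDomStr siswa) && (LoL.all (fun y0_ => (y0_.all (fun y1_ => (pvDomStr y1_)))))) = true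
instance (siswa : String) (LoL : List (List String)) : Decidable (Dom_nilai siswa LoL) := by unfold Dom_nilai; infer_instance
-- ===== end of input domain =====

-- B replaces A's tail-slicing recursion by one reversed pass building a dict plus a single
-- lookup (first matching record wins because later inserts overwrite); equivalence is about
-- return values on records that are all nonempty (Pre_).

-- ===== PORT A =====
-- helpers of A (s[0], s[1:], s[-1], s == []); pyGet? none = IndexError, outside Pre_
def pvFirst {α : Type} (s : List α) : Option α := PySem.List.pyGet? s 0
def pvTail {α : Type} (s : List α) : List α := PySem.List.slice s (some 1) none
def pvLast {α : Type} (s : List α) : Option α := PySem.List.pyGet? s (-1)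
def pvIsEmpty {α : Type} [BEq α] (s : List α) : Bool := s == []

def nilai (siswa : String) (LoL : List (List String)) : String :=
  if pvIsEmpty LoL then "Siswa itu tidak ada di kelas ini"
  else
    if (pvFirst ((pvFirst LoL).getD [])).getD "" == siswa then
      (pvLast ((pvFirst LoL).getD [])).getD ""
    else
      nilai siswa (pvTail LoL)
termination_by LoL.length
decreasing_by
  simp only [pvTail, PySem.List.slice_from_one]
  cases LoL with
  | nil => simp [pvIsEmpty] at *
  | cons a l => simp

-- ===== PORT B =====
def nilai_alt (siswa : String) (LoL : List (List String)) : String :=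
  let grades := LoL.reverse.foldl
    (fun d st => d.insert ((PySem.List.pyGet? st 0).getD "") ((PySem.List.pyGet? st (-1)).getD ""))
    PySem.Dict.empty
  grades.getD siswa "Siswa itu tidak ada di kelas ini"

-- ===== PRECONDITION & SPEC =====
-- Pre_ excludes lists containing an empty student record: there Python A raises IndexError on
-- s[0] unless the empty record comes only after a matching one (then A returns but B raises).
def Pre_nilai (siswa : String) (LoL : List (List String)) : Prop := ∀ s ∈ LoL, s ≠ []
instance (siswa : String) (LoL : List (List String)) : Decidable (Pre_nilai siswa LoL) := by unfold Pre_nilai; infer_instance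
def pvWitness_nilai : String × List (List String) := ("ani", [["budi", "80"], ["ani", "95"]])

def Spec_nilai (siswa : String) (LoL : List (List String)) (out : String) : Prop := out = nilai_alt siswa LoL
instance (siswa : String) (LoL : List (List String)) (out : String) : Decidable (Spec_nilai siswa LoL out) := by unfold Spec_nilai; infer_instance

-- ===== CLAIM (what is proved, stated in full; the proofs are below) =====
def Claim_equal_nilai : Prop := ∀ (siswa : String) (LoL : List (List String)), Dom_nilai siswa LoL → Pre_nilai siswa LoL → Spec_nilai siswa LoL (nilai siswa LoL)

-- ===== LEMMAS AND PROOFS =====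

-- the dict B builds from LoL
def pvDict (LoL : List (List String)) : PySem.Dict String String :=
  LoL.reverse.foldl
    (fun d st => d.insert ((PySem.List.pyGet? st 0).getD "") ((PySem.List.pyGet? st (-1)).getD ""))
    PySem.Dict.empty

theorem pvDict_cons (s : List String) (l : List (List String)) :
    pvDict (s :: l) = (pvDict l).insert ((PySem.List.pyGet? s 0).getD "") ((PySem.List.pyGet? s (-1)).getD "") := by
  simp [pvDict, List.foldl_append]

theorem nilai_eq_dict (siswa : String) (LoL : List (List String)) (h : Pre_nilai siswa LoL) :
    nilai siswa LoL = (pvDict LoL).getD siswa "Siswa itu tidak ada di kelas ini" := by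
  induction LoL with
  | nil => simp [nilai, pvIsEmpty, pvDict]
  | cons s l ih =>
    have hs : s ≠ [] := h s (by simp)
    have hl : Pre_nilai siswa l := fun t ht => h t (by simp [ht])
    rw [nilai, pvDict_cons, PySem.Dict.getD_insert]
    have hne : pvIsEmpty (s :: l) = false := by simp [pvIsEmpty]
    rw [hne]
    simp only [Bool.false_eq_true, if_false]
    have hfirst : pvFirst (s :: l) = some s := by simp [pvFirst]
    rw [hfirst]
    simp only [Option.getD_some]
    by_cases hk : siswa = (PySem.List.pyGet? s 0).getD ""
    · have : ((pvFirst s).getD "" == siswa) = true := by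
        simp [pvFirst, hk]
      rw [this, if_pos hk]
      simp [pvLast]
    · have : ((pvFirst s).getD "" == siswa) = false := by
        simp [pvFirst]
        exact fun he => hk he.symm
      rw [this, if_neg hk]
      simp only [Bool.false_eq_true, if_false]
      have htail : pvTail (s :: l) = l := by simp [pvTail, PySem.List.slice_from_one]
      rw [htail]
      exact ih hl

-- ===== VERDICT (by name: the statement is the Claim_ definition above) =====
theorem nilai_spec : Claim_equal_nilai := by
  intro siswa LoL _ hpre
  unfold Spec_nilai nilai_alt
  exact nilai_eq_dict siswa LoL hpre
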